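-- pv_equiv track=rewrite | github.com/pexley-math/oeis-A392363 | code/verify_geometric.py | fits_in_geometric
-- ===== SOURCE A (Python) =====
-- def R60(cell):
--     r, c = cell
--     t = (r + c) % 2
--     return ((r + c + 1) // 2, (c - 3 * r - t - 2) // 2)
--
-- def F(cell):
--     r, c = cell
--     return (-r - 1, c)
--
-- def transform(shape, k):
--     out = set(shape)
--     if k >= 6:
--         out = {F(x) for x in out}
--         k -= 6
--     for _ in range(k):
--         out = {R60(x) for x in out}
--     return frozenset(out)
--
-- def fits_in_geometric(piece_canonical, container_set):
--     """Return True iff piece fits in container via some rigid motion.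
--
--     Rigid motion = D_6 point-group element + parity-preserving translation
--     ((dr + dc) even). This is the standard crystallographic definition.
--     """
--     piece = set(piece_canonical)
--     Rmin = min(r for r, _ in container_set)
--     Rmax = max(r for r, _ in container_set)
--     Cmin = min(c for _, c in container_set)
--     Cmax = max(c for _, c in container_set)
--     for k in range(12):
--         orient = transform(piece, k)
--         rmin_o = min(r for r, _ in orient)
--         rmax_o = max(r for r, _ in orient)
--         cmin_o = min(c for _, c in orient)
--         cmax_o = max(c for _, c in orient)
--         for dr in range(Rmin - rmin_o, Rmax - rmax_o + 1):
--             for dc in range(Cmin - cmin_o, Cmax - cmax_o + 1):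
--                 if (dr + dc) % 2 != 0:
--                     continue  # skip parity-flipping "translations"
--                 translated = frozenset((r + dr, c + dc) for r, c in orient)
--                 if translated <= container_set:
--                     return True
--     return False
-- ===== SOURCE B (Python) =====
-- def _rot(cell):
--     r, c = cell
--     t = (r + c) % 2
--     return ((r + c + 1) // 2, (c - 3 * r - t - 2) // 2)
--
--
-- def _flip(cell):
--     r, c = cell
--     return (-r - 1, c)
--
--
-- def fits_in_geometric(piece_canonical, container_set):
--     """Anchor-based search: instead of scanning the whole bounding-box range of
--     translations, anchor one fixed piece cell onto each container cell and test
--     only those candidate translations (with the same parity check)."""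
--     cont = set(container_set)
--     base = list(dict.fromkeys(piece_canonical))
--     flipped = list(dict.fromkeys(_flip(x) for x in base))
--     for start in (base, flipped):
--         orient = start
--         for _ in range(6):
--             ar, ac = orient[0]
--             for cr, cc in container_set:
--                 dr, dc = cr - ar, cc - ac
--                 if (dr + dc) % 2 != 0:
--                     continue
--                 if all((r + dr, c + dc) in cont for r, c in orient):
--                     return True
--             orient = list(dict.fromkeys(_rot(x) for x in orient))
--     return False
-- ===== Notes on version B (the rewrite author's own statement) =====
-- stated objective: alternative
-- what changed: Instead of scanning every translation (dr,dc) in the container's full bounding-box range for each of the 12 orientations, B anchors the orientation's first cell onto each container cell and tests only those candidate translations (with the same parity check), and builds the 12 orientations incrementally by successive rotation instead of recomputing each from scratch.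
import Mathlib
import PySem

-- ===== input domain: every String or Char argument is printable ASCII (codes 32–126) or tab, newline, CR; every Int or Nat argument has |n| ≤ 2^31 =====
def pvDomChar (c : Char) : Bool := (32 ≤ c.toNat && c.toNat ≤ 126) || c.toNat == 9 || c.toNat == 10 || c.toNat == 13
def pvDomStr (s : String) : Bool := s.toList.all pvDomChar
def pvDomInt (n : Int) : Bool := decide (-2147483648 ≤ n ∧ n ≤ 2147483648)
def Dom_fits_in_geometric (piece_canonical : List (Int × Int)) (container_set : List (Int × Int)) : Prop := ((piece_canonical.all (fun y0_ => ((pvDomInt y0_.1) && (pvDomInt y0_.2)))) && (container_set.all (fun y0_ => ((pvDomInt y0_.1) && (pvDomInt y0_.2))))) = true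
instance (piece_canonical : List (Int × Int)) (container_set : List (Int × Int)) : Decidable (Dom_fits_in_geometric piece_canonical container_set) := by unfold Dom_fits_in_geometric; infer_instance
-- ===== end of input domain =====

-- B replaces A's scan over the whole bounding-box range of translations by anchoring one
-- piece cell on each container cell (objective: alternative algorithm, same result).

-- ===== PORT A =====
def pvR60 (cell : Int × Int) : Int × Int :=
  let r := cell.1
  let c := cell.2
  let t := PySem.Int.mod (r + c) 2
  (PySem.Int.floordiv (r + c + 1) 2, PySem.Int.floordiv (c - 3 * r - t - 2) 2)

def pvF (cell : Int × Int) : Int × Int := (-cell.1 - 1, cell.2)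

def pvTransform (shape : List (Int × Int)) (k : Int) : List (Int × Int) :=
  let out : PySem.Set (Int × Int) := PySem.Set.ofList shape
  let out2 : PySem.Set (Int × Int) := if k ≥ 6 then PySem.Set.ofList (out.map pvF) else out
  let k2 : Int := if k ≥ 6 then k - 6 else k
  (PySem.List.pyRange 0 k2 1).foldl (fun s _ => PySem.Set.ofList (s.map pvR60)) out2

-- body of A's `for k in range(12)` loop, given the container extremes
def pvOrientCheck (orient container_set : List (Int × Int)) (Rmin Rmax Cmin Cmax : Int) : Bool :=
  match PySem.List.min? (orient.map Prod.fst) (fun x => x),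
        PySem.List.max? (orient.map Prod.fst) (fun x => x),
        PySem.List.min? (orient.map Prod.snd) (fun x => x),
        PySem.List.max? (orient.map Prod.snd) (fun x => x) with
  | some rmin_o, some rmax_o, some cmin_o, some cmax_o =>
    (PySem.List.pyRange (Rmin - rmin_o) (Rmax - rmax_o + 1) 1).any (fun dr =>
      (PySem.List.pyRange (Cmin - cmin_o) (Cmax - cmax_o + 1) 1).any (fun dc =>
        if PySem.Int.mod (dr + dc) 2 ≠ 0 then false
        else PySem.Set.issubset
          (PySem.Set.ofList (orient.map (fun x => (x.1 + dr, x.2 + dc)))) container_set))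
  | _, _, _, _ => false  -- unreachable: orient is nonempty whenever this is evaluated

def fits_in_geometric (piece_canonical : List (Int × Int)) (container_set : List (Int × Int)) : Bool :=
  let piece : PySem.Set (Int × Int) := PySem.Set.ofList piece_canonical
  match PySem.List.min? (container_set.map Prod.fst) (fun x => x),
        PySem.List.max? (container_set.map Prod.fst) (fun x => x),
        PySem.List.min? (container_set.map Prod.snd) (fun x => x),
        PySem.List.max? (container_set.map Prod.snd) (fun x => x) with
  | some Rmin, some Rmax, some Cmin, some Cmax =>
    (PySem.List.pyRange 0 12 1).any (fun k =>
      pvOrientCheck (pvTransform piece k) container_set Rmin Rmax Cmin Cmax)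
  | _, _, _, _ => false  -- Python raises ValueError here (empty container); excluded by Pre_

-- ===== PORT B =====
def pvRotB (cell : Int × Int) : Int × Int :=
  let r := cell.1
  let c := cell.2
  let t := PySem.Int.mod (r + c) 2
  (PySem.Int.floordiv (r + c + 1) 2, PySem.Int.floordiv (c - 3 * r - t - 2) 2)

def pvFlipB (cell : Int × Int) : Int × Int := (-cell.1 - 1, cell.2)

-- one anchor pass: anchor orient's first cell on each container cell
def pvTryAnchor (orient container_set cont : List (Int × Int)) : Bool :=
  match orient with
  | [] => false  -- unreachable under Pre_ (Python raises IndexError on an empty piece)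
  | (ar, ac) :: _ =>
    container_set.any (fun cell =>
      let dr := cell.1 - ar
      let dc := cell.2 - ac
      if PySem.Int.mod (dr + dc) 2 ≠ 0 then false
      else orient.all (fun x => decide ((x.1 + dr, x.2 + dc) ∈ cont)))

def pvHalf (container_set cont : List (Int × Int)) : List (Int × Int) → Nat → Bool
  | _, 0 => false
  | orient, n + 1 =>
    pvTryAnchor orient container_set cont ||
      pvHalf container_set cont (PySem.List.dedup (orient.map pvRotB)) n

def fits_in_geometric_alt (piece_canonical : List (Int × Int)) (container_set : List (Int × Int)) : Bool :=
  let cont : PySem.Set (Int × Int) := PySem.Set.ofList container_set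
  let base := PySem.List.dedup piece_canonical
  let flipped := PySem.List.dedup (base.map pvFlipB)
  pvHalf container_set cont base 6 || pvHalf container_set cont flipped 6

-- ===== PRECONDITION & SPEC =====
-- Pre_ excludes exactly the inputs where Python A raises ValueError/min-of-empty:
-- an empty container or an empty piece.
def Pre_fits_in_geometric (piece_canonical : List (Int × Int)) (container_set : List (Int × Int)) : Prop :=
  piece_canonical ≠ [] ∧ container_set ≠ []
instance (piece_canonical : List (Int × Int)) (container_set : List (Int × Int)) : Decidable (Pre_fits_in_geometric piece_canonical container_set) := by unfold Pre_fits_in_geometric; infer_instance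

def pvWitness_fits_in_geometric : (List (Int × Int)) × (List (Int × Int)) :=
  ([(0, 0)], [(0, 0), (0, 1)])

def Spec_fits_in_geometric (piece_canonical : List (Int × Int)) (container_set : List (Int × Int)) (out : Bool) : Prop := out = fits_in_geometric_alt piece_canonical container_set
instance (piece_canonical : List (Int × Int)) (container_set : List (Int × Int)) (out : Bool) : Decidable (Spec_fits_in_geometric piece_canonical container_set out) := by unfold Spec_fits_in_geometric; infer_instance

-- ===== CLAIM (what is proved, stated in full; the proofs are below) =====
def Claim_equal_fits_in_geometric : Prop := ∀ (piece_canonical : List (Int × Int)) (container_set : List (Int × Int)), Dom_fits_in_geometric piece_canonical container_set → Pre_fits_in_geometric piece_canonical container_set → Spec_fits_in_geometric piece_canonical container_set (fits_in_geometric piece_canonical container_set)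


-- ===== LEMMAS AND PROOFS =====

-- the translation (dr, dc) places orient inside the container and respects parity
def pvFitsAt (O C : List (Int × Int)) (dr dc : Int) : Prop :=
  PySem.Int.mod (dr + dc) 2 = 0 ∧ ∀ x ∈ O, (x.1 + dr, x.2 + dc) ∈ C

lemma ofList_ne_nil {α : Type} [BEq α] [LawfulBEq α] {l : List α} (h : l ≠ []) :
    PySem.Set.ofList l ≠ [] := by
  obtain ⟨x, t, rfl⟩ := List.exists_cons_of_ne_nil h
  intro hc
  have : x ∈ PySem.Set.ofList (x :: t) := (PySem.Set.mem_ofList _ _).2 (List.mem_cons_self)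
  simp [hc] at this

lemma orientCheck_iff (O C : List (Int × Int)) (Rmin Rmax Cmin Cmax : Int)
    (hO : O ≠ [])
    (h1 : PySem.List.min? (C.map Prod.fst) (fun x => x) = some Rmin)
    (h2 : PySem.List.max? (C.map Prod.fst) (fun x => x) = some Rmax)
    (h3 : PySem.List.min? (C.map Prod.snd) (fun x => x) = some Cmin)
    (h4 : PySem.List.max? (C.map Prod.snd) (fun x => x) = some Cmax) :
    (pvOrientCheck O C Rmin Rmax Cmin Cmax = true ↔ ∃ dr dc, pvFitsAt O C dr dc) := by
  have hOf : O.map Prod.fst ≠ [] := by simpa using hO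
  have hOs : O.map Prod.snd ≠ [] := by simpa using hO
  obtain ⟨rmin, hrmin⟩ : ∃ m, PySem.List.min? (O.map Prod.fst) (fun x => x) = some m := by
    cases hm : PySem.List.min? (O.map Prod.fst) (fun x => x) with
    | none => exact absurd ((PySem.List.min?_eq_none_iff _ _).1 hm) hOf
    | some m => exact ⟨m, rfl⟩
  obtain ⟨rmax, hrmax⟩ : ∃ m, PySem.List.max? (O.map Prod.fst) (fun x => x) = some m := by
    cases hm : PySem.List.max? (O.map Prod.fst) (fun x => x) with
    | none => exact absurd ((PySem.List.max?_eq_none_iff _ _).1 hm) hOf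
    | some m => exact ⟨m, rfl⟩
  obtain ⟨cmin, hcmin⟩ : ∃ m, PySem.List.min? (O.map Prod.snd) (fun x => x) = some m := by
    cases hm : PySem.List.min? (O.map Prod.snd) (fun x => x) with
    | none => exact absurd ((PySem.List.min?_eq_none_iff _ _).1 hm) hOs
    | some m => exact ⟨m, rfl⟩
  obtain ⟨cmax, hcmax⟩ : ∃ m, PySem.List.max? (O.map Prod.snd) (fun x => x) = some m := by
    cases hm : PySem.List.max? (O.map Prod.snd) (fun x => x) with
    | none => exact absurd ((PySem.List.max?_eq_none_iff _ _).1 hm) hOs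
    | some m => exact ⟨m, rfl⟩
  unfold pvOrientCheck
  rw [hrmin, hrmax, hcmin, hcmax]
  simp only [List.any_eq_true, PySem.List.mem_pyRange_one]
  constructor
  · rintro ⟨dr, hdr, dc, hdc, hbody⟩
    simp at hbody
    refine ⟨dr, dc, (PySem.Int.mod_eq_zero_iff_dvd _ _).2 hbody.1, ?_⟩
    intro x hx
    obtain ⟨x1, x2⟩ := x
    exact hbody.2 _ _ x1 x2 hx rfl rfl
  · rintro ⟨dr, dc, hmod, hall⟩
    -- derive the range bounds from the attained extremes
    obtain ⟨xmin, hxminmem, hxmin⟩ := List.mem_map.1 (PySem.List.min?_mem hrmin)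
    obtain ⟨xmax, hxmaxmem, hxmax⟩ := List.mem_map.1 (PySem.List.max?_mem hrmax)
    obtain ⟨ymin, hyminmem, hymin⟩ := List.mem_map.1 (PySem.List.min?_mem hcmin)
    obtain ⟨ymax, hymaxmem, hymax⟩ := List.mem_map.1 (PySem.List.max?_mem hcmax)
    have hRlo : Rmin ≤ rmin + dr := by
      have hm := hall xmin hxminmem
      have := PySem.List.min?_isMin h1 _ (List.mem_map.2 ⟨_, hm, rfl⟩)
      simpa [hxmin] using this
    have hRhi : rmax + dr ≤ Rmax := by
      have hm := hall xmax hxmaxmem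
      have := PySem.List.max?_isMax h2 _ (List.mem_map.2 ⟨_, hm, rfl⟩)
      simpa [hxmax] using this
    have hClo : Cmin ≤ cmin + dc := by
      have hm := hall ymin hyminmem
      have := PySem.List.min?_isMin h3 _ (List.mem_map.2 ⟨_, hm, rfl⟩)
      simpa [hymin] using this
    have hChi : cmax + dc ≤ Cmax := by
      have hm := hall ymax hymaxmem
      have := PySem.List.max?_isMax h4 _ (List.mem_map.2 ⟨_, hm, rfl⟩)
      simpa [hymax] using this
    have hdvd : (2 : Int) ∣ dr + dc := (PySem.Int.mod_eq_zero_iff_dvd _ _).1 hmod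
    refine ⟨dr, ⟨by omega, by omega⟩, dc, ⟨by omega, by omega⟩, ?_⟩
    simp [hdvd]
    intro a b x1 x2 hmem e1 e2
    subst e1; subst e2
    exact hall (x1, x2) hmem

lemma tryAnchor_iff (O C : List (Int × Int)) (hO : O ≠ []) :
    (pvTryAnchor O C (PySem.Set.ofList C) = true ↔ ∃ dr dc, pvFitsAt O C dr dc) := by
  obtain ⟨⟨ar, ac⟩, t, rfl⟩ := List.exists_cons_of_ne_nil hO
  unfold pvTryAnchor
  simp only [List.any_eq_true]
  constructor
  · rintro ⟨cell, hcell, hbody⟩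
    simp at hbody
    refine ⟨cell.1 - ar, cell.2 - ac, (PySem.Int.mod_eq_zero_iff_dvd _ _).2 hbody.1, ?_⟩
    intro x hx
    obtain ⟨x1, x2⟩ := x
    rcases List.mem_cons.1 hx with h | h
    · have e : (x1 + (cell.1 - ar), x2 + (cell.2 - ac)) = cell := by
        obtain ⟨c1, c2⟩ := cell
        cases h
        simp only [Prod.mk.injEq]
        constructor <;> ring
      rw [e]
      exact hbody.2.1
    · exact hbody.2.2 x1 x2 h
  · rintro ⟨dr, dc, hmod, hall⟩
    refine ⟨(ar + dr, ac + dc), by simpa using hall (ar, ac) (by simp), ?_⟩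
    have e1 : ar + dr - ar = dr := by ring
    have e2 : ac + dc - ac = dc := by ring
    have hdvd : (2 : Int) ∣ dr + dc := (PySem.Int.mod_eq_zero_iff_dvd _ _).1 hmod
    simp only [e1, e2]
    simp [hdvd]
    constructor
    · simpa using hall (ar, ac) (by simp)
    · intro a b hmem
      simpa using hall (a, b) (List.mem_cons_of_mem _ hmem)

lemma map_ne_nil {α β : Type} {f : α → β} {l : List α} (h : l ≠ []) : l.map f ≠ [] := by
  simpa using h

-- iterating A's rotation step
lemma transform_lt6 (P : List (Int × Int)) (k : Int) (h0 : 0 ≤ k) (h6 : k < 6) :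
    pvTransform (PySem.Set.ofList P) k =
      (fun O => PySem.List.dedup (O.map pvRotB))^[k.toNat] (PySem.List.dedup P) := by
  dsimp only [pvTransform]
  rw [if_neg (by omega : ¬ k ≥ 6), if_neg (by omega : ¬ k ≥ 6)]
  simp only [PySem.Set.ofList_ofList, PySem.List.dedup_eq_ofList]
  have hrot : pvR60 = pvRotB := rfl
  rw [hrot]
  -- fold over pyRange 0 k 1 with a constant step is iteration
  have : ∀ (n : Nat) (s : List (Int × Int)),
      (PySem.List.pyRange 0 (n : Int) 1).foldl (fun s _ => PySem.Set.ofList (s.map pvRotB)) s =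
      (fun O => PySem.Set.ofList (O.map pvRotB))^[n] s := by
    intro n
    induction n with
    | zero => intro s; simp [PySem.List.pyRange_one_eq_nil]
    | succ m ih =>
      intro s
      rw [show ((m + 1 : Nat) : Int) = (m : Int) + 1 by push_cast; ring,
        PySem.List.pyRange_one_succ_right (by positivity), List.foldl_append]
      simp only [List.foldl_cons, List.foldl_nil]
      rw [Function.iterate_succ_apply', ih]
  have hk : k = ((k.toNat : Nat) : Int) := by omega
  rw [hk, this]
  congr 1

lemma transform_ge6 (P : List (Int × Int)) (k : Int) (h0 : 6 ≤ k) (h6 : k < 12) :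
    pvTransform (PySem.Set.ofList P) k =
      (fun O => PySem.List.dedup (O.map pvRotB))^[(k - 6).toNat]
        (PySem.List.dedup ((PySem.List.dedup P).map pvFlipB)) := by
  dsimp only [pvTransform]
  rw [if_pos (by omega : k ≥ 6), if_pos (by omega : k ≥ 6)]
  simp only [PySem.Set.ofList_ofList, PySem.List.dedup_eq_ofList]
  have hrot : pvR60 = pvRotB := rfl
  have hflip : pvF = pvFlipB := rfl
  rw [hrot, hflip]
  have : ∀ (n : Nat) (s : List (Int × Int)),
      (PySem.List.pyRange 0 (n : Int) 1).foldl (fun s _ => PySem.Set.ofList (s.map pvRotB)) s =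
      (fun O => PySem.Set.ofList (O.map pvRotB))^[n] s := by
    intro n
    induction n with
    | zero => intro s; simp [PySem.List.pyRange_one_eq_nil]
    | succ m ih =>
      intro s
      rw [show ((m + 1 : Nat) : Int) = (m : Int) + 1 by push_cast; ring,
        PySem.List.pyRange_one_succ_right (by positivity), List.foldl_append]
      simp only [List.foldl_cons, List.foldl_nil]
      rw [Function.iterate_succ_apply', ih]
  have hk : k - 6 = (((k - 6).toNat : Nat) : Int) := by omega
  rw [hk, this]
  congr 1

lemma iter_rot_ne_nil (n : Nat) (O : List (Int × Int)) (h : O ≠ []) :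
    (fun O => PySem.List.dedup (O.map pvRotB))^[n] O ≠ [] := by
  induction n generalizing O with
  | zero => simpa using h
  | succ m ih =>
    rw [Function.iterate_succ_apply]
    exact ih _ (by simpa [PySem.List.dedup_eq_ofList] using ofList_ne_nil (map_ne_nil h))

-- B's half-loop, characterised
lemma half_iff (C : List (Int × Int)) (n : Nat) (O : List (Int × Int)) (hO : O ≠ []) :
    (pvHalf C (PySem.Set.ofList C) O n = true ↔
      ∃ j < n, ∃ dr dc,
        pvFitsAt ((fun O => PySem.List.dedup (O.map pvRotB))^[j] O) C dr dc) := by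
  induction n generalizing O with
  | zero => simp [pvHalf]
  | succ m ih =>
    rw [pvHalf]
    simp only [Bool.or_eq_true]
    rw [tryAnchor_iff O C hO,
      ih (PySem.List.dedup (O.map pvRotB))
        (by simpa [PySem.List.dedup_eq_ofList] using ofList_ne_nil (map_ne_nil hO))]
    constructor
    · rintro (⟨dr, dc, h⟩ | ⟨j, hj, dr, dc, h⟩)
      · exact ⟨0, by omega, dr, dc, h⟩
      · refine ⟨j + 1, by omega, dr, dc, ?_⟩
        rwa [Function.iterate_succ_apply]
    · rintro ⟨j, hj, dr, dc, h⟩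
      cases j with
      | zero => exact Or.inl ⟨dr, dc, h⟩
      | succ i =>
        right
        refine ⟨i, by omega, dr, dc, ?_⟩
        rwa [Function.iterate_succ_apply] at h

-- ===== VERDICT (by name: the statement is the Claim_ definition above) =====
theorem fits_in_geometric_spec : Claim_equal_fits_in_geometric := by
  intro P C _ hpre
  obtain ⟨hP, hC⟩ := hpre
  unfold Spec_fits_in_geometric fits_in_geometric fits_in_geometric_alt
  have hCf : C.map Prod.fst ≠ [] := map_ne_nil hC
  have hCs : C.map Prod.snd ≠ [] := map_ne_nil hC
  obtain ⟨Rmin, h1⟩ : ∃ m, PySem.List.min? (C.map Prod.fst) (fun x => x) = some m := by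
    cases hm : PySem.List.min? (C.map Prod.fst) (fun x => x) with
    | none => exact absurd ((PySem.List.min?_eq_none_iff _ _).1 hm) hCf
    | some m => exact ⟨m, rfl⟩
  obtain ⟨Rmax, h2⟩ : ∃ m, PySem.List.max? (C.map Prod.fst) (fun x => x) = some m := by
    cases hm : PySem.List.max? (C.map Prod.fst) (fun x => x) with
    | none => exact absurd ((PySem.List.max?_eq_none_iff _ _).1 hm) hCf
    | some m => exact ⟨m, rfl⟩
  obtain ⟨Cmin, h3⟩ : ∃ m, PySem.List.min? (C.map Prod.snd) (fun x => x) = some m := by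
    cases hm : PySem.List.min? (C.map Prod.snd) (fun x => x) with
    | none => exact absurd ((PySem.List.min?_eq_none_iff _ _).1 hm) hCs
    | some m => exact ⟨m, rfl⟩
  obtain ⟨Cmax, h4⟩ : ∃ m, PySem.List.max? (C.map Prod.snd) (fun x => x) = some m := by
    cases hm : PySem.List.max? (C.map Prod.snd) (fun x => x) with
    | none => exact absurd ((PySem.List.max?_eq_none_iff _ _).1 hm) hCs
    | some m => exact ⟨m, rfl⟩
  rw [h1, h2, h3, h4]
  have hbase : PySem.List.dedup P ≠ [] := by
    simpa [PySem.List.dedup_eq_ofList] using ofList_ne_nil hP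
  have hflip : PySem.List.dedup ((PySem.List.dedup P).map pvFlipB) ≠ [] := by
    simpa [PySem.List.dedup_eq_ofList] using ofList_ne_nil (map_ne_nil hbase)
  rw [Bool.eq_iff_iff]
  simp only [List.any_eq_true, PySem.List.mem_pyRange_one, Bool.or_eq_true]
  rw [half_iff C 6 _ hbase, half_iff C 6 _ hflip]
  constructor
  · rintro ⟨k, ⟨hk0, hk12⟩, hchk⟩
    by_cases h6 : k < 6
    · left
      refine ⟨k.toNat, by omega, ?_⟩
      rw [← transform_lt6 P k hk0 h6]
      exact (orientCheck_iff _ C Rmin Rmax Cmin Cmax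
        (by rw [transform_lt6 P k hk0 h6]; exact iter_rot_ne_nil _ _ hbase) h1 h2 h3 h4).1 hchk
    · right
      refine ⟨(k - 6).toNat, by omega, ?_⟩
      rw [← transform_ge6 P k (by omega) hk12]
      exact (orientCheck_iff _ C Rmin Rmax Cmin Cmax
        (by rw [transform_ge6 P k (by omega) hk12]; exact iter_rot_ne_nil _ _ hflip) h1 h2 h3 h4).1 hchk
  · rintro (⟨j, hj, hfit⟩ | ⟨j, hj, hfit⟩)
    · refine ⟨(j : Int), ⟨by positivity, by exact_mod_cast by omega⟩, ?_⟩
      refine (orientCheck_iff _ C Rmin Rmax Cmin Cmax ?_ h1 h2 h3 h4).2 ?_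
      · rw [transform_lt6 P _ (by positivity) (by exact_mod_cast hj)]
        exact iter_rot_ne_nil _ _ hbase
      · rw [transform_lt6 P _ (by positivity) (by exact_mod_cast hj)]
        simpa using hfit
    · refine ⟨(j : Int) + 6, ⟨by positivity, by omega⟩, ?_⟩
      refine (orientCheck_iff _ C Rmin Rmax Cmin Cmax ?_ h1 h2 h3 h4).2 ?_
      · rw [transform_ge6 P _ (by omega) (by omega)]
        exact iter_rot_ne_nil _ _ hflip
      · rw [transform_ge6 P _ (by omega) (by omega)]
        have : ((j : Int) + 6 - 6).toNat = j := by omega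
        rw [this]
        simpa using hfit
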